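-- pv_equiv track=rewrite | github.com/mblanche/nextflow | docker/n50/n50.py | update_gc
-- ===== SOURCE A (Python) =====
-- from collections import defaultdict
--
-- def update_gc(seq, gc, at, n, minlen, scaffolds=True):
--     gc_bases = set(["G", "g", "C", "c"])
--     at_bases = set(["A", "a", "T", "t"])
--     n_bases = set(["N", "n"])
--     if scaffolds and len(seq) < minlen:
--         return gc, at, n
--
--     counts = get_counts(seq)
--     for base in counts.keys():
--         if base in gc_bases:
--             gc += counts[base]
--         elif base in at_bases:
--             at += counts[base]
--         else:
--             n += counts[base]
--     return gc, at, n
--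
-- def get_counts(seq):
--     counts = defaultdict(int)
--     for base in seq:
--         counts[base] += 1
--     return counts
-- ===== SOURCE B (Python) =====
-- # One-pass table dispatch: each base indexes directly into a 3-slot tally
-- # (gc, at, n); characters outside the table fall into slot 2.
-- _CLASS = {"G": 0, "g": 0, "C": 0, "c": 0, "A": 1, "a": 1, "T": 1, "t": 1}
--
-- def update_gc(seq, gc_total, at, n, minlen, scaffolds=True):
--     if scaffolds and len(seq) < minlen:
--         return gc_total, at, n
--     totals = [gc_total, at, n]
--     for base in seq:
--         totals[_CLASS.get(base, 2)] += 1
--     return totals[0], totals[1], totals[2]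
-- ===== Notes on version B (the rewrite author's own statement) =====
-- stated objective: simpler
-- what changed: Replaces A's two-phase build-a-frequency-dict-then-classify-its-keys with a single pass that dispatches each character through a fixed char-to-slot table into a 3-slot tally, removing get_counts and the set-membership branch chain.
import Mathlib
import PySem

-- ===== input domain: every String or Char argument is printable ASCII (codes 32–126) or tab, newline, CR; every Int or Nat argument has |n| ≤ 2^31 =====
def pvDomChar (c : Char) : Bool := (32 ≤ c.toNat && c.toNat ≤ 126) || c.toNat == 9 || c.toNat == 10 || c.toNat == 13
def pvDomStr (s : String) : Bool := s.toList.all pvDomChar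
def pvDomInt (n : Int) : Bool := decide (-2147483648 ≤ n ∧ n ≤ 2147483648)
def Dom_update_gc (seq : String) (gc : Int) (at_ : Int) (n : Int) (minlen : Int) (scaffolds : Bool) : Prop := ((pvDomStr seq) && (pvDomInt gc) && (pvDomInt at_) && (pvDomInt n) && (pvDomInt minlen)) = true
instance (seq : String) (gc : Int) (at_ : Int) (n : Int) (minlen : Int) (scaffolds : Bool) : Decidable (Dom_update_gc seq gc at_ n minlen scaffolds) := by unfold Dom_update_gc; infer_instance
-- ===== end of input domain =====

-- B replaces the build-a-frequency-dict-then-classify-its-keys structure by a single pass that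
-- dispatches each character through a fixed char-to-slot table into a 3-slot tally (simpler).

-- ===== PORT A =====
-- Python one-character strings are ported as Char; the base sets are PySem.Set literals
-- (written inline at their use sites; n_bases is unused by A's code and dropped).
def get_counts (seq : String) : PySem.Dict Char Int :=
  seq.toList.foldl (fun d base => d.modify base 0 (· + 1)) PySem.Dict.empty

def update_gc (seq : String) (gc : Int) (at_ : Int) (n : Int) (minlen : Int) (scaffolds : Bool) : Int × Int × Int :=
  if scaffolds && decide (PySem.Str.len seq < minlen) then (gc, at_, n)
  else
    (get_counts seq).keys.foldl
      (fun acc base =>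
        if (PySem.Set.ofList ['G', 'g', 'C', 'c']).contains base then
          (acc.1 + (get_counts seq).getD base 0, acc.2.1, acc.2.2)
        else if (PySem.Set.ofList ['A', 'a', 'T', 't']).contains base then
          (acc.1, acc.2.1 + (get_counts seq).getD base 0, acc.2.2)
        else (acc.1, acc.2.1, acc.2.2 + (get_counts seq).getD base 0))
      (gc, at_, n)

-- ===== PORT B =====
-- Source B's module-level _CLASS dict; the 3-element totals list is ported as a triple, and
-- 'totals[i] += 1' for i ∈ {0,1,2} as the corresponding component update.
def classTable : PySem.Dict Char Int :=
  PySem.Dict.ofList [('G', 0), ('g', 0), ('C', 0), ('c', 0), ('A', 1), ('a', 1), ('T', 1), ('t', 1)]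

def update_gc_alt (seq : String) (gc : Int) (at_ : Int) (n : Int) (minlen : Int) (scaffolds : Bool) : Int × Int × Int :=
  if scaffolds && decide (PySem.Str.len seq < minlen) then (gc, at_, n)
  else
    seq.toList.foldl
      (fun totals base =>
        let i := classTable.getD base 2
        if i = 0 then (totals.1 + 1, totals.2.1, totals.2.2)
        else if i = 1 then (totals.1, totals.2.1 + 1, totals.2.2)
        else (totals.1, totals.2.1, totals.2.2 + 1))
      (gc, at_, n)

-- ===== PRECONDITION & SPEC =====
def Spec_update_gc (seq : String) (gc : Int) (at_ : Int) (n : Int) (minlen : Int) (scaffolds : Bool) (out : Int × Int × Int) : Prop := out = update_gc_alt seq gc at_ n minlen scaffolds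
instance (seq : String) (gc : Int) (at_ : Int) (n : Int) (minlen : Int) (scaffolds : Bool) (out : Int × Int × Int) : Decidable (Spec_update_gc seq gc at_ n minlen scaffolds out) := by unfold Spec_update_gc; infer_instance

-- ===== CLAIM (what is proved, stated in full; the proofs are below) =====
def Claim_equal_update_gc : Prop := ∀ (seq : String) (gc : Int) (at_ : Int) (n : Int) (minlen : Int) (scaffolds : Bool), Dom_update_gc seq gc at_ n minlen scaffolds → Spec_update_gc seq gc at_ n minlen scaffolds (update_gc seq gc at_ n minlen scaffolds)

-- ===== LEMMAS AND PROOFS =====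

-- the three classifying predicates of A's loop
def gcP (c : Char) : Bool := (PySem.Set.ofList ['G', 'g', 'C', 'c']).contains c
def atP (c : Char) : Bool := (PySem.Set.ofList ['A', 'a', 'T', 't']).contains c
def elseP (c : Char) : Bool := !gcP c && !atP c

theorem gcP_at_false (c : Char) (h : gcP c = true) : atP c = false := by
  have hc : c = 'G' ∨ c = 'g' ∨ c = 'C' ∨ c = 'c' := by simpa [gcP] using h
  rcases hc with rfl | rfl | rfl | rfl <;> decide

-- B's class table agrees with A's classification
theorem classTable_getD (c : Char) :
    classTable.getD c 2 = if gcP c then 0 else if atP c then 1 else 2 := by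
  by_cases h1 : c = 'G'; · subst h1; decide
  by_cases h2 : c = 'g'; · subst h2; decide
  by_cases h3 : c = 'C'; · subst h3; decide
  by_cases h4 : c = 'c'; · subst h4; decide
  by_cases h5 : c = 'A'; · subst h5; decide
  by_cases h6 : c = 'a'; · subst h6; decide
  by_cases h7 : c = 'T'; · subst h7; decide
  by_cases h8 : c = 't'; · subst h8; decide
  have hg : gcP c = false := by simp [gcP, h1, h2, h3, h4]
  have ha : atP c = false := by simp [atP, h5, h6, h7, h8]
  rw [hg, ha]
  simp only [Bool.false_eq_true, if_false]
  have hkeys : classTable.keys = ['G', 'g', 'C', 'c', 'A', 'a', 'T', 't'] := by decide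
  have hmem : c ∉ classTable.keys := by
    rw [hkeys]; intro hc
    simp only [List.mem_cons, List.not_mem_nil, or_false] at hc
    tauto
  have hnone : classTable.get? c = none := (PySem.Dict.get?_eq_none_iff_not_mem_keys classTable c).mpr hmem
  rw [PySem.Dict.getD_eq_get?_getD, hnone]; rfl

-- A's classification fold splits into three independent sums
theorem foldA_split (counts : PySem.Dict Char Int) (K : List Char) (g a m : Int) :
    K.foldl
      (fun acc base =>
        if (PySem.Set.ofList ['G', 'g', 'C', 'c']).contains base then
          (acc.1 + counts.getD base 0, acc.2.1, acc.2.2)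
        else if (PySem.Set.ofList ['A', 'a', 'T', 't']).contains base then
          (acc.1, acc.2.1 + counts.getD base 0, acc.2.2)
        else (acc.1, acc.2.1, acc.2.2 + counts.getD base 0))
      (g, a, m)
    = (g + ((K.filter gcP).map (fun k => counts.getD k 0)).sum,
       a + ((K.filter atP).map (fun k => counts.getD k 0)).sum,
       m + ((K.filter elseP).map (fun k => counts.getD k 0)).sum) := by
  induction K generalizing g a m with
  | nil => simp
  | cons h t ih =>
    simp only [List.foldl_cons, List.filter_cons]
    by_cases hg : gcP h
    · have hgc : (PySem.Set.ofList ['G', 'g', 'C', 'c']).contains h = true := hg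
      have hat : atP h = false := gcP_at_false h hg
      have hel : elseP h = false := by simp [elseP, hg]
      rw [if_pos hgc, ih]
      simp [hg, hat, hel, add_assoc]
    · have hg' : gcP h = false := by simpa using hg
      by_cases ha : atP h
      · have hat : (PySem.Set.ofList ['A', 'a', 'T', 't']).contains h = true := ha
        have hgn : ¬((PySem.Set.ofList ['G', 'g', 'C', 'c']).contains h = true) := hg
        have hel : elseP h = false := by simp [elseP, ha]
        rw [if_neg hgn, if_pos hat, ih]
        simp [hg', ha, hel, add_assoc]
      · have ha' : atP h = false := by simpa using ha
        have hgn : ¬((PySem.Set.ofList ['G', 'g', 'C', 'c']).contains h = true) := hg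
        have han : ¬((PySem.Set.ofList ['A', 'a', 'T', 't']).contains h = true) := ha
        have hel : elseP h = true := by simp [elseP, hg', ha']
        rw [if_neg hgn, if_neg han, ih]
        simp [hg', ha', hel, add_assoc]

-- summing l.count over the distinct p-elements of l is countP p
theorem sum_count_ofList (p : Char → Bool) (l : List Char) :
    (((PySem.Set.ofList l).filter p).map (fun k => ((l.count k : Int)))).sum = (l.countP p : Int) := by
  have hperm : (PySem.Set.ofList l).Perm l.dedup :=
    (List.perm_ext_iff_of_nodup (PySem.Set.nodup_ofList l) l.nodup_dedup).mpr
      (fun a => by simp [PySem.Set.mem_ofList, List.mem_dedup])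
  rw [((hperm.filter p).map (fun k => ((l.count k : Int)))).sum_eq]
  calc ((l.dedup.filter p).map (fun k => ((l.count k : Int)))).sum
      = (((l.dedup.filter p).map (fun x => l.count x)).map (fun m : Nat => (m : Int))).sum := by
        rw [List.map_map]; rfl
    _ = (((l.dedup.filter p).map (fun x => l.count x)).sum : Int) := (Nat.cast_list_sum _).symm
    _ = (l.countP p : Int) := by rw [List.sum_map_count_dedup_filter_eq_countP p l]

theorem stepB_eq (h : Char) (t : Int × Int × Int) :
    (let i := classTable.getD h 2;
     if i = 0 then (t.1 + 1, t.2.1, t.2.2)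
     else if i = 1 then (t.1, t.2.1 + 1, t.2.2)
     else (t.1, t.2.1, t.2.2 + 1))
    = if gcP h then (t.1 + 1, t.2.1, t.2.2)
      else if atP h then (t.1, t.2.1 + 1, t.2.2)
      else (t.1, t.2.1, t.2.2 + 1) := by
  simp only [classTable_getD]
  split_ifs <;> simp_all

-- B's single pass accumulates exactly the three class counts
theorem foldB_split (l : List Char) (g a m : Int) :
    l.foldl
      (fun totals base =>
        let i := classTable.getD base 2
        if i = 0 then (totals.1 + 1, totals.2.1, totals.2.2)
        else if i = 1 then (totals.1, totals.2.1 + 1, totals.2.2)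
        else (totals.1, totals.2.1, totals.2.2 + 1))
      (g, a, m)
    = (g + (l.countP gcP : Int), a + (l.countP atP : Int), m + (l.countP elseP : Int)) := by
  induction l generalizing g a m with
  | nil => simp
  | cons h t ih =>
    rw [List.foldl_cons]
    show List.foldl _
        (let i := classTable.getD h 2;
         if i = 0 then (g + 1, a, m)
         else if i = 1 then (g, a + 1, m)
         else (g, a, m + 1)) t = _
    rw [stepB_eq h (g, a, m)]
    simp only [List.countP_cons]
    by_cases hg : gcP h
    · have hat : atP h = false := gcP_at_false h hg
      have hel : elseP h = false := by simp [elseP, hg]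
      rw [if_pos hg, ih]
      simp only [hg, hat, hel]
      refine Prod.ext ?_ (Prod.ext ?_ ?_) <;> simp <;> push_cast <;> ring
    · have hg' : gcP h = false := by simpa using hg
      by_cases ha : atP h
      · have hel : elseP h = false := by simp [elseP, ha]
        rw [if_neg hg, if_pos ha, ih]
        simp only [hg', ha, hel]
        refine Prod.ext ?_ (Prod.ext ?_ ?_) <;> simp <;> push_cast <;> ring
      · have ha' : atP h = false := by simpa using ha
        have hel : elseP h = true := by simp [elseP, hg', ha']
        rw [if_neg hg, if_neg ha, ih]
        simp only [hg', ha', hel]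
        refine Prod.ext ?_ (Prod.ext ?_ ?_) <;> simp <;> push_cast <;> ring

-- ===== VERDICT (by name: the statement is the Claim_ definition above) =====
theorem update_gc_spec : Claim_equal_update_gc := by
  intro seq gc at_ n minlen scaffolds _
  unfold Spec_update_gc update_gc update_gc_alt
  by_cases hIf : (scaffolds && decide (PySem.Str.len seq < minlen)) = true
  · rw [if_pos hIf, if_pos hIf]
  · rw [if_neg hIf, if_neg hIf]
    have hcounts : get_counts seq = PySem.Dict.counter seq.toList := by
      rw [PySem.Dict.counter_eq_foldl]; rfl
    set l := seq.toList with hl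
    rw [hcounts, foldA_split, PySem.Dict.keys_counter, foldB_split]
    have hw : (fun k => (PySem.Dict.counter l).getD k 0) = (fun k => ((l.count k : Int))) :=
      funext (fun k => PySem.Dict.getD_counter l k)
    rw [hw, sum_count_ofList gcP l, sum_count_ofList atP l, sum_count_ofList elseP l]
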